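-- pv_equiv track=rewrite | github.com/NullPxl/short_v_long_yt | compare_ten_video_short_pairs_rate.py | choose_pairs
-- ===== SOURCE A (Python) =====
-- def choose_pairs(video_ids: list[str], short_ids: list[str], num_pairs: int) -> list[tuple[str, str]]:
--     pairs: list[tuple[str, str]] = []
--     used_short_ids: set[str] = set()
--
--     for v_id in video_ids:
--         chosen_short = None
--         for s_id in short_ids:
--             if s_id in used_short_ids:
--                 continue
--             if s_id != v_id:
--                 chosen_short = s_id
--                 break
--         if chosen_short is None:
--             for s_id in short_ids:
--                 if s_id not in used_short_ids:
--                     chosen_short = s_id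
--                     break
--         if chosen_short is None:
--             break
--         pairs.append((v_id, chosen_short))
--         used_short_ids.add(chosen_short)
--         if len(pairs) >= num_pairs:
--             break
--
--     return pairs
-- ===== SOURCE B (Python) =====
-- def choose_pairs(video_ids: list[str], short_ids: list[str], num_pairs: int) -> list[tuple[str, str]]:
--     # unused shorts = distinct values in first-occurrence order; kept reversed so pop() is O(1)
--     stack = list(dict.fromkeys(short_ids))[::-1]
--     pairs: list[tuple[str, str]] = []
--     for v in video_ids:
--         if not stack:
--             break
--         s = stack.pop()
--         if s == v and stack:
--             t = stack.pop()
--             stack.append(s)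
--             s = t
--         pairs.append((v, s))
--         if len(pairs) >= num_pairs:
--             break
--     return pairs
-- ===== Notes on version B (the rewrite author's own statement) =====
-- stated objective: faster
-- what changed: Instead of rescanning short_ids from the start for every video while skipping a growing used-set, B dedups short_ids once in first-occurrence order and consumes that list from the front (swapping past at most one equal-valued head per step), eliminating the inner scans.
import Mathlib
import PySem

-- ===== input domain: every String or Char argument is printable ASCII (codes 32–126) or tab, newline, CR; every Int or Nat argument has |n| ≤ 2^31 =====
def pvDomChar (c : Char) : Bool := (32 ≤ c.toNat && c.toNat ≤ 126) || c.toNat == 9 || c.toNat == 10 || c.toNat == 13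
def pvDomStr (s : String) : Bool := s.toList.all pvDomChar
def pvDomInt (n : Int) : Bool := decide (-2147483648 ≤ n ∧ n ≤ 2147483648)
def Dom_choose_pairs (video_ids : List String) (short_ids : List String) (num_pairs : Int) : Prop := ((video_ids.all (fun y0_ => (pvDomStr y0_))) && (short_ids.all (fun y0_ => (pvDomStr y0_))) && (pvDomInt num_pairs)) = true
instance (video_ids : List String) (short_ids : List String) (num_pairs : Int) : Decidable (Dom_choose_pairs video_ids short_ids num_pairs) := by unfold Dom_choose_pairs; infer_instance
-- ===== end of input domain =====

-- B replaces A's per-video rescans of short_ids (skipping a growing used-set) by one upfront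
-- ordered dedup of short_ids that is then consumed from the front; same return value, fewer scans.

-- ===== PORT A =====
-- A's outer loop over video_ids; each step scans short_ids (find? = the for/break scan): first unused short ≠ v, else first unused short.
def choose_pairsLoop (shorts : List String) (num_pairs : Int) :
    List String → PySem.Set String → List (String × String) → List (String × String)
  | [], _, pairs => pairs
  | v :: vs, used, pairs =>
    let chosen1 := shorts.find? (fun s => !(PySem.Set.contains used s) && s != v)
    let chosen := match chosen1 with
      | some s => some s
      | none => shorts.find? (fun s => !(PySem.Set.contains used s))
    match chosen with
    | none => pairs
    | some s =>
      let pairs' := pairs ++ [(v, s)]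
      if (pairs'.length : Int) ≥ num_pairs then pairs'
      else choose_pairsLoop shorts num_pairs vs (PySem.Set.add used s) pairs'
-- ===== PORT B =====
-- B's loop over video_ids, consuming the deduped unused-shorts list from the front (Source B keeps it
-- reversed only so Python's pop() is O(1); this is the same element order and the same choices).
def choose_pairs_altLoop : List String → List String → Int → List (String × String)
  | [], _, _ => []
  | _ :: _, [], _ => []
  | v :: vs, s :: rest, k =>
    let cr : String × List String :=
      if s = v then
        match rest with
        | [] => (s, [])
        | t :: rest' => (t, s :: rest')
      else (s, rest)
    (v, cr.1) :: (if k ≤ 1 then [] else choose_pairs_altLoop vs cr.2 (k - 1))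

def choose_pairs (video_ids : List String) (short_ids : List String) (num_pairs : Int) : List (String × String) :=
  choose_pairsLoop short_ids num_pairs video_ids PySem.Set.empty []

def choose_pairs_alt (video_ids : List String) (short_ids : List String) (num_pairs : Int) : List (String × String) :=
  choose_pairs_altLoop video_ids (PySem.List.dedup short_ids) num_pairs

-- ===== PRECONDITION & SPEC =====
def Spec_choose_pairs (video_ids : List String) (short_ids : List String) (num_pairs : Int) (out : List (String × String)) : Prop := out = choose_pairs_alt video_ids short_ids num_pairs
instance (video_ids : List String) (short_ids : List String) (num_pairs : Int) (out : List (String × String)) : Decidable (Spec_choose_pairs video_ids short_ids num_pairs out) := by unfold Spec_choose_pairs; infer_instance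

-- ===== CLAIM (what is proved, stated in full; the proofs are below) =====
def Claim_equal_choose_pairs : Prop := ∀ (video_ids : List String) (short_ids : List String) (num_pairs : Int), Dom_choose_pairs video_ids short_ids num_pairs → Spec_choose_pairs video_ids short_ids num_pairs (choose_pairs video_ids short_ids num_pairs)

-- ===== LEMMAS AND PROOFS =====
theorem my_find?_filter (l : List String) (q p : String → Bool) : (l.filter q).find? p = l.find? (fun x => q x && p x) := by
  induction l with
  | nil => rfl
  | cons x xs ih =>
    by_cases hq : q x
    · by_cases hp : p x <;> simp [List.find?, hq, hp, ih]
    · simp [List.find?, hq, ih]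
theorem my_find?_ofList (l : List String) (p : String → Bool) :
    (PySem.Set.ofList l).find? p = l.find? p := by
  induction l with
  | nil => rfl
  | cons x xs ih =>
    rw [PySem.Set.ofList_cons]
    by_cases hp : p x
    · simp [List.find?, hp]
    · have hpx : p x = false := Bool.eq_false_iff.mpr hp
      simp only [List.find?, hpx]
      show (PySem.Set.discard (PySem.Set.ofList xs) x).find? p = _
      have hdis : PySem.Set.discard (PySem.Set.ofList xs) x = (PySem.Set.ofList xs).filter (fun y => !(y == x)) := rfl
      rw [hdis, my_find?_filter]
      have hfun : (fun y => (!(y == x)) && p y) = p := by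
        funext y; by_cases hy : y = x <;> simp [hy, hpx]
      rw [hfun, ih]
theorem my_contains_add (u : List String) (c x : String) : PySem.Set.contains (PySem.Set.add u c) x = (PySem.Set.contains u x || x == c) := by
  simp only [PySem.Set.contains_eq_listContains, List.contains_eq_mem, PySem.Set.mem_add]
  by_cases hx : x ∈ u <;> by_cases hc : x = c <;> simp [hx, hc]
theorem my_filter_add (shorts : List String) (used : PySem.Set String) (c : String) :
    (PySem.List.dedup shorts).filter (fun s => !(PySem.Set.contains (PySem.Set.add used c) s)) =
    ((PySem.List.dedup shorts).filter (fun s => !(PySem.Set.contains used s))).filter (fun s => !(s == c)) := by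
  rw [List.filter_filter]
  congr 1
  funext s
  rw [my_contains_add]
  cases PySem.Set.contains used s <;> cases hc : (s == c) <;> rfl

theorem loop_eq (shorts : List String) (np : Int) : ∀ (vs : List String) (used : PySem.Set String) (pairs : List (String × String)),
    choose_pairsLoop shorts np vs used pairs =
      pairs ++ choose_pairs_altLoop vs ((PySem.List.dedup shorts).filter (fun s => !(PySem.Set.contains used s))) (np - pairs.length) := by
  intro vs
  induction vs with
  | nil => intro used pairs; simp [choose_pairsLoop, choose_pairs_altLoop]
  | cons v vs ih =>
    intro used pairs
    have hrem_nd : (((PySem.List.dedup shorts).filter (fun s => !(PySem.Set.contains used s)))).Nodup := by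
      simp only [PySem.List.dedup_eq_ofList]
      exact List.Nodup.filter _ (PySem.Set.nodup_ofList shorts)
    have h1 : shorts.find? (fun s => !(PySem.Set.contains used s) && s != v) =
        ((PySem.List.dedup shorts).filter (fun s => !(PySem.Set.contains used s))).find? (fun s => s != v) := by
      simp only [PySem.List.dedup_eq_ofList]
      rw [my_find?_filter, my_find?_ofList]
    have h2 : shorts.find? (fun s => !(PySem.Set.contains used s)) =
        ((PySem.List.dedup shorts).filter (fun s => !(PySem.Set.contains used s))).find? (fun _ => true) := by
      simp only [PySem.List.dedup_eq_ofList]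
      rw [my_find?_filter, my_find?_ofList]
      congr 1
      funext x
      simp
    have tail : ∀ (c : String) (newrem : List String),
        (PySem.List.dedup shorts).filter (fun x => !(PySem.Set.contains (PySem.Set.add used c) x)) = newrem →
        (if (((pairs ++ [(v,c)]).length : Int) ≥ np) then pairs ++ [(v,c)]
         else choose_pairsLoop shorts np vs (PySem.Set.add used c) (pairs ++ [(v,c)])) =
        pairs ++ ((v,c) :: (if np - (pairs.length : Int) ≤ 1 then []
          else choose_pairs_altLoop vs newrem (np - (pairs.length : Int) - 1))) := by
      intro c newrem hnr
      have hlen : ((pairs ++ [(v,c)]).length : Int) = (pairs.length : Int) + 1 := by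
        simp
      by_cases hk : np - (pairs.length : Int) ≤ 1
      · rw [if_pos (by omega), if_pos hk]
      · rw [if_neg (by omega), if_neg hk, ih, hnr]
        have hlen' : np - ((pairs ++ [(v,c)]).length : Int) = np - (pairs.length : Int) - 1 := by
          omega
        rw [hlen']
        simp
    cases hrem : (PySem.List.dedup shorts).filter (fun s => !(PySem.Set.contains used s)) with
    | nil =>
      have h1' : shorts.find? (fun s => !(PySem.Set.contains used s) && s != v) = none := by
        rw [h1, hrem]; rfl
      have h2' : shorts.find? (fun s => !(PySem.Set.contains used s)) = none := by
        rw [h2, hrem]; rfl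
      simp only [choose_pairsLoop, choose_pairs_altLoop, h1', h2']
      simp
    | cons s rest =>
      rw [hrem] at hrem_nd
      have hsrest : s ∉ rest := (List.nodup_cons.mp hrem_nd).1
      by_cases hsv : s = v
      · cases rest with
        | nil =>
          have h1' : shorts.find? (fun s => !(PySem.Set.contains used s) && s != v) = none := by
            rw [h1, hrem]
            have hb : (s != v) = false := by simp [hsv]
            simp [List.find?, hb]
          have h2' : shorts.find? (fun s => !(PySem.Set.contains used s)) = some s := by
            rw [h2, hrem]; simp [List.find?]
          have hnew : (PySem.List.dedup shorts).filter (fun x => !(PySem.Set.contains (PySem.Set.add used s) x)) = [] := by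
            rw [my_filter_add, hrem]; simp
          simp only [choose_pairsLoop, h1', h2']
          rw [tail s [] hnew]
          simp only [choose_pairs_altLoop, if_pos hsv]
        | cons t rest' =>
          have hst : s ≠ t := fun h => hsrest (h ▸ List.mem_cons_self ..)
          have hnd' : (t :: rest').Nodup := (List.nodup_cons.mp hrem_nd).2
          have htrest : t ∉ rest' := (List.nodup_cons.mp hnd').1
          have h1' : shorts.find? (fun s => !(PySem.Set.contains used s) && s != v) = some t := by
            rw [h1, hrem]
            have hst' : t ≠ v := fun h => (hsv ▸ h ▸ hsrest) (List.mem_cons_self ..)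
            have hb1 : (s != v) = false := by simp [hsv]
            have hb2 : (t != v) = true := by simp [hst']
            simp [List.find?, hb1, hb2]
          have hnew : (PySem.List.dedup shorts).filter (fun x => !(PySem.Set.contains (PySem.Set.add used t) x)) = s :: rest' := by
            rw [my_filter_add, hrem]
            simp only [List.filter_cons]
            simp [hst]
            exact fun a ha hat => htrest (hat ▸ ha)
          simp only [choose_pairsLoop, h1']
          rw [tail t (s :: rest') hnew]
          simp only [choose_pairs_altLoop, if_pos hsv]
      · have h1' : shorts.find? (fun s => !(PySem.Set.contains used s) && s != v) = some s := by
          rw [h1, hrem]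
          have hb : (s != v) = true := by simp [hsv]
          simp [List.find?, hb]
        have hnew : (PySem.List.dedup shorts).filter (fun x => !(PySem.Set.contains (PySem.Set.add used s) x)) = rest := by
          rw [my_filter_add, hrem]
          simp only [List.filter_cons]
          simp
          exact fun a ha hat => hsrest (hat ▸ ha)
        simp only [choose_pairsLoop, h1']
        rw [tail s rest hnew]
        simp only [choose_pairs_altLoop, if_neg hsv]

-- ===== VERDICT (by name: the statement is the Claim_ definition above) =====
theorem choose_pairs_spec : Claim_equal_choose_pairs := by
  intro vids sids np _
  unfold Spec_choose_pairs choose_pairs choose_pairs_alt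
  have h := loop_eq sids np vids PySem.Set.empty []
  simpa using h
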